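-- pv_equiv track=rewrite | github.com/sabeelgithub/learn-python | Techniqual/_array.py | execution
-- ===== SOURCE A (Python) =====
-- from typing import List
-- from typing import List
--
-- def looping(sl_arr,arr):
--     for i in sl_arr:
--         arr.remove(i)
--     return arr
--
-- def execution(N:int,M:int,arr:List[int],queries:List[str]):
--
--     for query in queries:
--         if query[0] == '1':
--             sl_arr = arr[int(query[1])-1:int(query[2])]
--             arr = looping(sl_arr,arr)
--             arr = sl_arr + arr
--         elif query[0] == '2':
--             sl_arr = arr[int(query[1])-1:int(query[2])]
--             arr = looping(sl_arr,arr)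
--             arr = arr + sl_arr
--
--     diff = arr[0]-arr[len(arr)-1]
--     diff = abs(diff)
--     return diff,arr
-- ===== SOURCE B (Python) =====
-- def execution(N, M, arr, queries):
--     for query in queries:
--         if query[0] == '1' or query[0] == '2':
--             sl_arr = arr[int(query[1])-1:int(query[2])]
--             cnt = {}
--             for x in sl_arr:
--                 cnt[x] = cnt.get(x, 0) + 1
--             rest = []
--             for x in arr:
--                 if cnt.get(x, 0) > 0:
--                     cnt[x] -= 1
--                 else:
--                     rest.append(x)
--             arr = sl_arr + rest if query[0] == '1' else rest + sl_arr
--     diff = abs(arr[0] - arr[-1])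
--     return diff, arr
-- ===== Notes on version B (the rewrite author's own statement) =====
-- stated objective: alternative
-- what changed: Replaces the per-element repeated list.remove scan with a value->count dictionary built from the slice and a single left-to-right pass over arr that skips the first cnt[v] occurrences of each value.
import Mathlib
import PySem

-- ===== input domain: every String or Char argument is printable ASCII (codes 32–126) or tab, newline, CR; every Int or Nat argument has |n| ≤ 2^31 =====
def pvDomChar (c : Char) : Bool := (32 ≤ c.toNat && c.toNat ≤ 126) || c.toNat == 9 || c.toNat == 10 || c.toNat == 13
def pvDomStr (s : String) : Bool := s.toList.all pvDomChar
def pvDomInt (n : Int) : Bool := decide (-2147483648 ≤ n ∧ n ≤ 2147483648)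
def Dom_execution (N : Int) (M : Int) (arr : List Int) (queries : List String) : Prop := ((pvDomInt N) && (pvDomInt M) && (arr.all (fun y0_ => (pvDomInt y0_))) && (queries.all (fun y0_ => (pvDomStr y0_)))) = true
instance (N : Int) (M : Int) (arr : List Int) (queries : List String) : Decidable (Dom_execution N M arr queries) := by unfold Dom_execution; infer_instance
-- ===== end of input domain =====

-- B replaces A's repeated list.remove scans (one per slice element) by a value->count
-- dictionary of the slice and ONE pass over arr that skips the first cnt[v] occurrences
-- of each value (objective: alternative removal algorithm). Equivalence is about the
-- RETURN value only: Python A mutates the caller's list in place (arr.remove), B does not.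

-- ===== PORT A =====
-- query[0], query[1], query[2] : IndexError (none) when the query is too short — excluded by Pre_
def pvQChar (q : String) (i : Int) : Char := (PySem.Str.pyGet? q i).getD ' '
-- int(query[i]) on the one-character string: ValueError (none) unless a digit — excluded by Pre_
def pvQInt (q : String) (i : Int) : Int := (PySem.Int.ofChars? [pvQChar q i]).getD 0
-- arr.remove(i): ValueError is unreachable here (sl_arr is a slice of arr), so getD arr never fires
def pvRemove1 (a : List Int) (x : Int) : List Int := (PySem.List.remove? a x).getD a
def looping (sl_arr : List Int) (arr : List Int) : List Int := sl_arr.foldl pvRemove1 arr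
def pvStepA (arr : List Int) (query : String) : List Int :=
  if pvQChar query 0 = '1' then
    let sl_arr := PySem.List.slice arr (some (pvQInt query 1 - 1)) (some (pvQInt query 2))
    sl_arr ++ looping sl_arr arr
  else if pvQChar query 0 = '2' then
    let sl_arr := PySem.List.slice arr (some (pvQInt query 1 - 1)) (some (pvQInt query 2))
    looping sl_arr arr ++ sl_arr
  else arr
def execution (N : Int) (M : Int) (arr : List Int) (queries : List String) : Int × List Int :=
  let a := queries.foldl pvStepA arr
  -- arr[0] / arr[len(arr)-1] : IndexError on the empty list — excluded by Pre_ (arr ≠ [])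
  let diff := (PySem.List.pyGet? a 0).getD 0 - (PySem.List.pyGet? a ((a.length : Int) - 1)).getD 0
  (|diff|, a)

-- ===== PORT B =====
-- cnt = {}; for x in sl_arr: cnt[x] = cnt.get(x, 0) + 1
def pvCounter (sl_arr : List Int) : PySem.Dict Int Int :=
  sl_arr.foldl (fun d x => d.insert x (d.getD x 0 + 1)) PySem.Dict.empty
-- for x in arr: if cnt.get(x,0) > 0: cnt[x] -= 1 else: rest.append(x)
def pvSkim (cnt : PySem.Dict Int Int) : List Int → List Int
  | [] => []
  | x :: t => if cnt.getD x 0 > 0 then pvSkim (cnt.insert x (cnt.getD x 0 - 1)) t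
              else x :: pvSkim cnt t
def pvStepB (arr : List Int) (query : String) : List Int :=
  if pvQChar query 0 = '1' ∨ pvQChar query 0 = '2' then
    let sl_arr := PySem.List.slice arr (some (pvQInt query 1 - 1)) (some (pvQInt query 2))
    let rest := pvSkim (pvCounter sl_arr) arr
    if pvQChar query 0 = '1' then sl_arr ++ rest else rest ++ sl_arr
  else arr
def execution_alt (N : Int) (M : Int) (arr : List Int) (queries : List String) : Int × List Int :=
  let a := queries.foldl pvStepB arr
  let diff := |(PySem.List.pyGet? a 0).getD 0 - (PySem.List.pyGet? a (-1)).getD 0|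
  (diff, a)

-- ===== PRECONDITION & SPEC =====
-- ok(query): Python evaluates query[0] always (IndexError on ""), and when the query starts
-- with '1' or '2' it also needs query[1], query[2] to exist and be digits (int() else ValueError)
def pvQok (q : String) : Bool :=
  match q.toList with
  | [] => false
  | c :: rest =>
    if c = '1' ∨ c = '2' then
      match rest with
      | c1 :: c2 :: _ => c1.isDigit && c2.isDigit
      | _ => false
    else true
-- exactly the inputs where Python A returns: nonempty arr (final arr[0]/arr[-1]) and well-formed queries
def Pre_execution (N : Int) (M : Int) (arr : List Int) (queries : List String) : Prop :=
  arr ≠ [] ∧ ∀ q ∈ queries, pvQok q = true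
instance (N : Int) (M : Int) (arr : List Int) (queries : List String) : Decidable (Pre_execution N M arr queries) := by unfold Pre_execution; infer_instance
def pvWitness_execution : Int × Int × List Int × List String := (5, 2, [1, 2, 3, 4, 5], ["112", "225"])
def Spec_execution (N : Int) (M : Int) (arr : List Int) (queries : List String) (out : Int × List Int) : Prop := out = execution_alt N M arr queries
instance (N : Int) (M : Int) (arr : List Int) (queries : List String) (out : Int × List Int) : Decidable (Spec_execution N M arr queries out) := by unfold Spec_execution; infer_instance

-- ===== CLAIM (what is proved, stated in full; the proofs are below) =====
def Claim_equal_execution : Prop := ∀ (N : Int) (M : Int) (arr : List Int) (queries : List String), Dom_execution N M arr queries → Pre_execution N M arr queries → Spec_execution N M arr queries (execution N M arr queries)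

-- ===== LEMMAS AND PROOFS =====

-- total first-occurrence removal (what (remove? a x).getD a computes)
def pvErase1 (x : Int) : List Int → List Int
  | [] => []
  | y :: t => if y = x then t else y :: pvErase1 x t

theorem pvRemove1_eq_erase1 (a : List Int) (x : Int) : pvRemove1 a x = pvErase1 x a := by
  induction a with
  | nil => rfl
  | cons y t ih =>
    by_cases h : y = x
    · subst h; simp [pvRemove1, pvErase1, PySem.List.remove?_cons_self]
    · rw [pvRemove1, PySem.List.remove?_cons_of_ne t h]
      simp only [pvErase1, if_neg h]
      cases hr : PySem.List.remove? t x with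
      | none =>
        have ht : pvErase1 x t = t := by rw [← ih]; simp [pvRemove1, hr]
        simp [ht]
      | some l =>
        have hl : pvErase1 x t = l := by rw [← ih]; simp [pvRemove1, hr]
        simp [hl]

-- function-indexed version of B's skimming pass
def pvCF (c : Int → Int) : List Int → List Int
  | [] => []
  | x :: t => if c x > 0 then pvCF (fun v => if v = x then c x - 1 else c v) t
              else x :: pvCF c t

theorem pvSkim_eq_CF (arr : List Int) : ∀ d : PySem.Dict Int Int,
    pvSkim d arr = pvCF (fun v => d.getD v 0) arr := by
  induction arr with
  | nil => intro d; rfl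
  | cons x t ih =>
    intro d
    simp only [pvSkim, pvCF]
    by_cases h : d.getD x 0 > 0
    · rw [if_pos h, if_pos h, ih]
      congr 1
      funext v
      simp [PySem.Dict.getD_insert]
    · rw [if_neg h, if_neg h, ih]

theorem pvCF_nonpos (c : Int → Int) (h : ∀ v, ¬ c v > 0) (arr : List Int) :
    pvCF c arr = arr := by
  induction arr with
  | nil => rfl
  | cons x t ih => simp only [pvCF, if_neg (h x)]; rw [ih]

-- unfolding equations for B's skimming pass
theorem pvCF_cons_pos (c : Int → Int) (x : Int) (t : List Int) (h : c x > 0) :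
    pvCF c (x :: t) = pvCF (fun v => if v = x then c x - 1 else c v) t := by
  simp only [pvCF, if_pos h]

theorem pvCF_cons_neg (c : Int → Int) (x : Int) (t : List Int) (h : ¬ c x > 0) :
    pvCF c (x :: t) = x :: pvCF c t := by
  simp only [pvCF, if_neg h]

-- one removal step commutes with the counting filter
theorem pvCF_bump (s : Int) (arr : List Int) : ∀ c : Int → Int, (∀ v, 0 ≤ c v) →
    pvCF (fun v => if v = s then c v + 1 else c v) arr = pvCF c (pvErase1 s arr) := by
  induction arr with
  | nil => intro c _; rfl
  | cons x t ih =>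
    intro c hc
    by_cases hx : x = s
    · subst hx
      have he : pvErase1 x (x :: t) = t := by simp [pvErase1]
      have hpos : (if x = x then c x + 1 else c x) > 0 := by
        rw [if_pos rfl]; have := hc x; omega
      rw [he, pvCF_cons_pos _ x t hpos]
      congr 1
      funext v
      by_cases hv : v = x
      · subst hv; simp only [if_true]; omega
      · simp [hv]
    · have he : pvErase1 s (x :: t) = x :: pvErase1 s t := by simp [pvErase1, hx]
      rw [he]
      by_cases hcx : c x > 0
      · have hb : (if x = s then c x + 1 else c x) > 0 := by rw [if_neg hx]; exact hcx
        rw [pvCF_cons_pos _ x t hb, pvCF_cons_pos c x (pvErase1 s t) hcx,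
            ← ih (fun v => if v = x then c x - 1 else c v)
              (by intro v; by_cases hv : v = x
                  · simp only [if_pos hv]; omega
                  · simp only [if_neg hv]; exact hc v)]
        congr 1
        funext v
        by_cases hv1 : v = x
        · subst hv1; simp [hx]
        · by_cases hv2 : v = s <;> simp [hv1, hv2, Ne.symm hx]
      · have hb : ¬ (if x = s then c x + 1 else c x) > 0 := by rw [if_neg hx]; exact hcx
        rw [pvCF_cons_neg _ x t hb, pvCF_cons_neg c x (pvErase1 s t) hcx, ih c hc]

-- A's repeated remove equals the count-indexed filter
theorem looping_eq_CF (sl : List Int) : ∀ arr : List Int,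
    looping sl arr = pvCF (fun v => (sl.count v : Int)) arr := by
  induction sl with
  | nil =>
    intro arr
    rw [show looping [] arr = arr from rfl, pvCF_nonpos _ (fun v => by simp)]
  | cons s rest ih =>
    intro arr
    have h1 : looping (s :: rest) arr = looping rest (pvRemove1 arr s) := rfl
    rw [h1, ih, pvRemove1_eq_erase1,
        ← pvCF_bump s arr (fun v => (rest.count v : Int)) (fun v => Int.natCast_nonneg _)]
    congr 1
    funext v
    rw [List.count_cons]
    by_cases hv : v = s
    · simp [hv]
    · simp [hv, Ne.symm hv]

-- core: A's looping = B's counter skim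
theorem looping_eq_skim (sl arr : List Int) :
    looping sl arr = pvSkim (pvCounter sl) arr := by
  rw [pvSkim_eq_CF, looping_eq_CF]
  congr 1
  funext v
  simp [pvCounter, PySem.Dict.getD_foldl_insert_add_one, PySem.Dict.getD_empty]

theorem step_eq (arr : List Int) (q : String) : pvStepA arr q = pvStepB arr q := by
  simp only [pvStepA, pvStepB]
  by_cases h1 : pvQChar q 0 = '1'
  · simp [h1, looping_eq_skim]
  · by_cases h2 : pvQChar q 0 = '2'
    · simp [h2, looping_eq_skim]
    · simp [h1, h2]

theorem pyGet?_len_sub_one (a : List Int) :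
    PySem.List.pyGet? a ((a.length : Int) - 1) = PySem.List.pyGet? a (-1) := by
  cases a with
  | nil => rfl
  | cons x t =>
    rw [PySem.List.pyGet?_neg_one]
    have h0 : (0:Int) ≤ (((x :: t).length : Int) - 1) := by
      simp only [List.length_cons]; push_cast; omega
    rw [PySem.List.pyGet?_of_nonneg _ h0]
    have ht : (((x :: t).length : Int) - 1).toNat = (x :: t).length - 1 := by
      simp only [List.length_cons]; push_cast; omega
    rw [ht, List.getLast?_eq_getElem?]

-- ===== VERDICT (by name: the statement is the Claim_ definition above) =====
theorem execution_spec : Claim_equal_execution := by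
  intro N M arr queries _ _
  show _ = _
  simp only [execution, execution_alt]
  have hfold : queries.foldl pvStepA arr = queries.foldl pvStepB arr := by
    congr 1
    funext a q
    exact step_eq a q
  rw [hfold, pyGet?_len_sub_one]
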